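-- pv_equiv track=rewrite | github.com/jn9uyen/ml2 | src/utils/partitioning_utils.py | partition_numbers_by_proximity
-- ===== SOURCE A (Python) =====
-- from collections.abc import Callable, Sequence
--
-- def partition_numbers_by_proximity(
--     numbers: Sequence[int | float], threshold: int | float
-- ) -> list[Sequence[int | float]]:
--     """
--     Partition numbers to maximize the largest group's size.
--
--     This function takes a list of numbers and partitions them into non-overlapping
--     groups. A group is considered valid if the difference between its maximum and
--     minimum value is ≤ the specified threshold. The function uses dynamic programming
--     to find an optimal partition that maximizes the size of the largest group.
--
--     Parameters
--     ----------
--     numbers : Sequence[int | float]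
--         A list of numbers to be partitioned. The list can contain duplicates
--         and will be sorted internally.
--     threshold : int | float
--         The maximum allowed difference (`max - min`) within a valid group.
--         Must be a non-negative number.
--
--     Returns
--     -------
--     list[Sequence[int | float]]
--         The optimal partitioning of the numbers, returned as a list of lists.
--
--     Examples
--     --------
--     >>> numbers = [15, 17, 18, 20]
--     >>> threshold = 3
--     >>> group_numbers_by_proximity(numbers, threshold)
--     [[15, 17, 18], [20]]
--
--     >>> numbers2 = [1, 2, 3, 8, 9, 12]
--     >>> threshold2 = 2
--     >>> group_numbers_by_proximity(numbers2, threshold2)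
--     [[1, 2, 3], [8, 9], [12]]
--     """
--     if not numbers:
--         return []
--
--     assert threshold > 0, "Threshold must be > 0."
--
--     # Sort unique numbers to enable efficient group validation.
--     nums: Sequence[int | float] = sorted(list(set(numbers)))
--     n: int = len(nums)
--
--     # Memoization cache for the dynamic programming solution.
--     memo: dict[int, tuple[int, list[Sequence[int | float]]]] = {}
--
--     def solve(i: int) -> tuple[int, list[Sequence[int | float]]]:
--         """
--         Find the optimal partition for the prefix nums[:i].
--         Returns a tuple: (max_group_size, partition).
--         """
--         if i == 0:
--             return (0, [])
--         if i in memo: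
--             return memo[i]
--
--         best_option: tuple[int, list[Sequence[int | float]]] = (-1, [])
--
--         # For the i-th number, try all valid "last groups".
--         for j in range(i):
--             new_group: Sequence[int | float] = nums[j:i]
--
--             # Check if the new group is valid.
--             if new_group[-1] - new_group[0] <= threshold:
--                 prev_max_size, prev_partition = solve(j)
--                 current_max_size: int = max(prev_max_size, len(new_group))
--
--                 # If this option gives a larger max group, it's the new best.
--                 if current_max_size > best_option[0]:
--                     current_partition: list[Sequence[int | float]] = prev_partition + [
--                         new_group
--                     ]
--                     best_option = (current_max_size, current_partition)
--
--         memo[i] = best_option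
--         return best_option
--
--     # Solve for the entire list.
--     _max_size, final_partition = solve(n)
--     return final_partition
-- ===== SOURCE B (Python) =====
-- def partition_numbers_by_proximity(numbers, threshold):
--     """Bottom-up DP over sorted unique values: keep only the best largest-group
--     size and a parent pointer per prefix, then reconstruct the partition once."""
--     if not numbers:
--         return []
--     assert threshold > 0, "Threshold must be > 0."
--     nums = sorted(set(numbers))
--     n = len(nums)
--     best = [0]    # best[i] = optimal largest-group size for the prefix nums[:i]
--     parent = [0]  # start index of the last group in that optimal partition
--     for i in range(1, n + 1):
--         bs = -1
--         bj = 0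
--         for j in range(i):
--             if nums[i - 1] - nums[j] <= threshold:
--                 size = i - j
--                 c = best[j] if best[j] > size else size
--                 if c > bs:
--                     bs = c
--                     bj = j
--         best.append(bs)
--         parent.append(bj)
--     groups = []
--     i = n
--     while i > 0:
--         j = parent[i]
--         groups.append(nums[j:i])
--         i = j
--     groups.reverse()
--     return groups
-- ===== Notes on version B (the rewrite author's own statement) =====
-- stated objective: faster
-- what changed: Replaced A's top-down memoized recursion that builds a candidate partition list for every improving split (and slices the array to validate each group) with a bottom-up DP storing only the best largest-group size and a parent pointer per prefix, validating groups by endpoint arithmetic, and reconstructing the partition once at the end.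
import Mathlib
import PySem

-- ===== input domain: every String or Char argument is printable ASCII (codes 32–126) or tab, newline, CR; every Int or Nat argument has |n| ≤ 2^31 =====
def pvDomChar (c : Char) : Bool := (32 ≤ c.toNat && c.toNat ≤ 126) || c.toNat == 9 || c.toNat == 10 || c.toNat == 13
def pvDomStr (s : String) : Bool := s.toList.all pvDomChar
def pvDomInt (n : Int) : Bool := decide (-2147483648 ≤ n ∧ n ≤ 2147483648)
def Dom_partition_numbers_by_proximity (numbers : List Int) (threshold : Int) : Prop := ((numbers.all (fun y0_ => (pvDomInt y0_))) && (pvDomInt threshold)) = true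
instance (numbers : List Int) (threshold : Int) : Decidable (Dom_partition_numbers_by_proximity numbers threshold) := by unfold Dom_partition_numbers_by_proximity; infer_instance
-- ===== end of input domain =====

-- B replaces A's top-down memoized recursion (which builds candidate partitions and slices
-- the array for every split) by a bottom-up size-and-parent-pointer DP with a single final
-- reconstruction; objective: faster (fewer/cheaper operations per DP cell).


-- ===== PORT A =====
-- solve(i): optimal (max_group_size, partition) for nums[:i]; the memo cache of the Python
-- only affects speed, not the value, so the port is the plain recursion.
def pvSolveA (nums : List Int) (t : Int) : Nat → Int × List (List Int)
  | 0 => (0, [])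
  | i + 1 =>
    (List.range (i + 1)).attach.foldl
      (fun best j =>
        let g := PySem.List.slice nums (some ((j.1 : Nat) : Int)) (some (((i + 1 : Nat)) : Int))
        -- new_group[-1] / new_group[0]: always in range (the slice is nonempty for j < i),
        -- so the total indexing form pyGetD is exact here
        if PySem.List.pyGetD g (-1) 0 - PySem.List.pyGetD g 0 0 ≤ t then
          let prev := pvSolveA nums t j.1
          let cur := max prev.1 ((g.length : Int))
          if cur > best.1 then (cur, prev.2 ++ [g]) else best
        else best)
      (-1, [])
  termination_by i => i
  decreasing_by
    have hj := j.2
    simp only [List.mem_range] at hj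
    omega

def partition_numbers_by_proximity (numbers : List Int) (threshold : Int) : List (List Int) :=
  if numbers = [] then []
  else
    let nums := PySem.List.sorted (PySem.Set.ofList numbers) (fun x => x) false
    (pvSolveA nums threshold nums.length).2

-- ===== PORT B =====
-- inner loop body of B's DP: state (bs, bj)
def pvStepB (nums : List Int) (t : Int) (bestL : List Int) (i : Nat)
    (s : Int × Nat) (j : Nat) : Int × Nat :=
  if PySem.List.pyGetD nums ((i : Int) - 1) 0 - PySem.List.pyGetD nums (j : Int) 0 ≤ t then
    let size : Int := (i : Int) - (j : Int)
    let bj := PySem.List.pyGetD bestL (j : Int) 0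
    let c := if bj > size then bj else size
    if c > s.1 then (c, j) else s
  else s

-- the j-loop 'for j in range(i)'
def pvInnerB (nums : List Int) (t : Int) (bestL : List Int) (i : Nat) : Int × Nat :=
  (List.range i).foldl (pvStepB nums t bestL i) (-1, 0)

-- the i-loop 'for i in range(1, n+1)', appending to best/parent
def pvTablesB (nums : List Int) (t : Int) (n : Nat) : List Int × List Nat :=
  (List.range' 1 n).foldl
    (fun st i =>
      let r := pvInnerB nums t st.1 i
      (st.1 ++ [r.1], st.2 ++ [r.2]))
    ([0], [0])

-- 'while i > 0' reconstruction; fuel bounds the loop (the chain i > parent[i] is strictly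
-- decreasing, so fuel = n+1 is never exhausted)
def pvReconB (nums : List Int) (parent : List Nat) : Nat → Nat → List (List Int) → List (List Int)
  | 0, _, acc => acc
  | fuel + 1, i, acc =>
    if 0 < i then
      let j := parent.getD i 0
      pvReconB nums parent fuel j (acc ++ [PySem.List.slice nums (some (j : Int)) (some (i : Int))])
    else acc

def partition_numbers_by_proximity_alt (numbers : List Int) (threshold : Int) : List (List Int) :=
  if numbers = [] then []
  else
    let nums := PySem.List.sorted (PySem.Set.ofList numbers) (fun x => x) false
    let n := nums.length
    let tb := pvTablesB nums threshold n
    (pvReconB nums tb.2 (n + 1) n []).reverse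

-- ===== PRECONDITION & SPEC =====
-- Pre_ excludes only the inputs on which A raises: the 'assert threshold > 0' fires
-- (AssertionError) whenever numbers is nonempty and threshold ≤ 0.
def Pre_partition_numbers_by_proximity (numbers : List Int) (threshold : Int) : Prop :=
  numbers = [] ∨ 0 < threshold
instance (numbers : List Int) (threshold : Int) : Decidable (Pre_partition_numbers_by_proximity numbers threshold) := by unfold Pre_partition_numbers_by_proximity; infer_instance

def pvWitness_partition_numbers_by_proximity : List Int × Int := ([15, 17, 18, 20], 3)

def Spec_partition_numbers_by_proximity (numbers : List Int) (threshold : Int) (out : List (List Int)) : Prop := out = partition_numbers_by_proximity_alt numbers threshold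
instance (numbers : List Int) (threshold : Int) (out : List (List Int)) : Decidable (Spec_partition_numbers_by_proximity numbers threshold out) := by unfold Spec_partition_numbers_by_proximity; infer_instance

-- ===== CLAIM (what is proved, stated in full; the proofs are below) =====
def Claim_equal_partition_numbers_by_proximity : Prop := ∀ (numbers : List Int) (threshold : Int), Dom_partition_numbers_by_proximity numbers threshold → Pre_partition_numbers_by_proximity numbers threshold → Spec_partition_numbers_by_proximity numbers threshold (partition_numbers_by_proximity numbers threshold)

-- ===== LEMMAS AND PROOFS =====

-- the group nums[j:i] as drop/take
def pvGr (nums : List Int) (j i : Nat) : List Int := (nums.drop j).take (i - j)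

-- A's loop body, named and let-free (definitionally the lambda inside pvSolveA)
def pvStepA (nums : List Int) (t : Int) (i : Nat) (best : Int × List (List Int)) (j : Nat) :
    Int × List (List Int) :=
  if PySem.List.pyGetD (PySem.List.slice nums (some ((j : Nat) : Int)) (some ((i : Nat) : Int))) (-1) 0
      - PySem.List.pyGetD (PySem.List.slice nums (some ((j : Nat) : Int)) (some ((i : Nat) : Int))) 0 0 ≤ t then
    if max (pvSolveA nums t j).1
        (((PySem.List.slice nums (some ((j : Nat) : Int)) (some ((i : Nat) : Int))).length : Int)) > best.1 then
      (max (pvSolveA nums t j).1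
        (((PySem.List.slice nums (some ((j : Nat) : Int)) (some ((i : Nat) : Int))).length : Int)),
       (pvSolveA nums t j).2 ++ [PySem.List.slice nums (some ((j : Nat) : Int)) (some ((i : Nat) : Int))])
    else best
  else best

theorem pvSolveA_succ (nums : List Int) (t : Int) (i : Nat) (h : 0 < i) :
    pvSolveA nums t i = (List.range i).foldl (pvStepA nums t i) (-1, []) := by
  obtain ⟨m, rfl⟩ : ∃ m, i = m + 1 := ⟨i - 1, by omega⟩
  rw [pvSolveA]
  exact List.foldl_attach (f := pvStepA nums t (m + 1))

-- B's loop body, let-free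
theorem pvStepB_eq (nums : List Int) (t : Int) (bestL : List Int) (i : Nat)
    (s : Int × Nat) (j : Nat) :
    pvStepB nums t bestL i s j =
    if PySem.List.pyGetD nums ((i : Int) - 1) 0 - PySem.List.pyGetD nums ((j : Nat) : Int) 0 ≤ t then
      if (if PySem.List.pyGetD bestL ((j : Nat) : Int) 0 > (i : Int) - (j : Int) then
            PySem.List.pyGetD bestL ((j : Nat) : Int) 0 else (i : Int) - (j : Int)) > s.1 then
        ((if PySem.List.pyGetD bestL ((j : Nat) : Int) 0 > (i : Int) - (j : Int) then
            PySem.List.pyGetD bestL ((j : Nat) : Int) 0 else (i : Int) - (j : Int)), j)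
      else s
    else s := rfl

theorem pvSlice_eq (nums : List Int) (j i : Nat) :
    PySem.List.slice nums (some ((j : Nat) : Int)) (some ((i : Nat) : Int)) = pvGr nums j i :=
  PySem.List.slice_natCast ..

theorem pvGr_length (nums : List Int) (j i : Nat) (_h1 : j < i) (h2 : i ≤ nums.length) :
    (pvGr nums j i).length = i - j := by
  simp [pvGr]; omega

theorem pvGr_first (nums : List Int) (j i : Nat) (h1 : j < i) (h2 : i ≤ nums.length) :
    PySem.List.pyGetD (pvGr nums j i) 0 0 = nums.getD j 0 := by
  rw [PySem.List.pyGetD_zero, pvGr]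
  rw [List.getD_eq_getElem?_getD, List.getElem?_take_of_lt (by omega), List.getElem?_drop,
    List.getElem?_eq_getElem (by omega), List.getD_eq_getElem _ _ (by omega)]
  simp

theorem pvGr_last (nums : List Int) (j i : Nat) (h1 : j < i) (h2 : i ≤ nums.length) :
    PySem.List.pyGetD (pvGr nums j i) (-1) 0 = nums.getD (i - 1) 0 := by
  rw [PySem.List.pyGetD_neg_ofNat (pvGr nums j i) 1 0 (by omega)
    (by rw [pvGr_length nums j i h1 h2]; omega)]
  have hl : (pvGr nums j i).length - 1 = i - j - 1 := by rw [pvGr_length nums j i h1 h2]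
  have hopt : (pvGr nums j i)[(pvGr nums j i).length - 1]? = some (nums.getD (i - 1) 0) := by
    rw [hl, pvGr, List.getElem?_take_of_lt (by omega), List.getElem?_drop]
    have : j + (i - j - 1) = i - 1 := by omega
    rw [this, List.getElem?_eq_getElem (by omega), List.getD_eq_getElem _ _ (by omega)]
  exact (List.getElem_eq_iff _).mpr hopt

theorem pvGetD_pred (nums : List Int) (i : Nat) (h : 1 ≤ i) :
    PySem.List.pyGetD nums ((i : Int) - 1) 0 = nums.getD (i - 1) 0 := by
  have : (i : Int) - 1 = ((i - 1 : Nat) : Int) := by omega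
  rw [this, PySem.List.pyGetD_natCast]

theorem pvGetD_append_left {α : Type} (xs ys : List α) (j : Nat) (d : α) (h : j < xs.length) :
    (xs ++ ys).getD j d = xs.getD j d := by
  rw [List.getD_eq_getElem?_getD, List.getD_eq_getElem?_getD, List.getElem?_append_left h]

theorem pvGetD_append_last {α : Type} (xs : List α) (v d : α) (j : Nat) (h : j = xs.length) :
    (xs ++ [v]).getD j d = v := by
  subst h
  rw [List.getD_eq_getElem?_getD, List.getElem?_append_right (le_refl _)]
  simp

-- invariant relating A's fold state to B's (bs, bj) state, for the i-th inner loop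
def pvRel (nums : List Int) (t : Int) (i : Nat) (a : Int × List (List Int)) (b : Int × Nat) : Prop :=
  a.1 = b.1 ∧ (a.1 = -1 → a.2 = []) ∧
  (a.1 ≠ -1 → b.2 < i ∧ a.2 = (pvSolveA nums t b.2).2 ++ [pvGr nums b.2 i])

theorem pvStep_rel (nums : List Int) (t : Int) (bestL : List Int) (i j : Nat)
    (h1 : j < i) (h2 : i ≤ nums.length)
    (hb : bestL.getD j 0 = (pvSolveA nums t j).1)
    (a : Int × List (List Int)) (b : Int × Nat) (hr : pvRel nums t i a b) :
    pvRel nums t i (pvStepA nums t i a j) (pvStepB nums t bestL i b j) := by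
  obtain ⟨he, hneg, hpos⟩ := hr
  rw [pvStepB_eq]
  unfold pvStepA
  rw [pvSlice_eq, pvGr_first nums j i h1 h2, pvGr_last nums j i h1 h2,
    pvGetD_pred nums i (by omega)]
  simp only [PySem.List.pyGetD_natCast]
  rw [hb]
  have hlen : ((pvGr nums j i).length : Int) = (i : Int) - (j : Int) := by
    rw [pvGr_length nums j i h1 h2]; omega
  have hsz1 : (1 : Int) ≤ (i : Int) - (j : Int) := by omega
  have hc : max (pvSolveA nums t j).1 ((pvGr nums j i).length : Int) =
      (if (pvSolveA nums t j).1 > (i : Int) - (j : Int) then (pvSolveA nums t j).1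
       else (i : Int) - (j : Int)) := by
    rw [hlen]
    rcases le_or_gt ((pvSolveA nums t j).1) ((i : Int) - (j : Int)) with h | h
    · rw [max_eq_right h, if_neg (by omega)]
    · rw [max_eq_left (le_of_lt h), if_pos h]
  rw [hc, he]
  split_ifs with hcond hP hgt hgt
  · exact ⟨rfl, fun habs => by omega, fun _ => ⟨h1, rfl⟩⟩
  · exact ⟨he, hneg, hpos⟩
  · exact ⟨rfl, fun habs => by omega, fun _ => ⟨h1, rfl⟩⟩
  · exact ⟨he, hneg, hpos⟩
  · exact ⟨he, hneg, hpos⟩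

theorem pvFold_rel (nums : List Int) (t : Int) (bestL : List Int) (i : Nat)
    (h2 : i ≤ nums.length)
    (hb : ∀ j, j < i → bestL.getD j 0 = (pvSolveA nums t j).1)
    (l : List Nat) (hl : ∀ j ∈ l, j < i)
    (a : Int × List (List Int)) (b : Int × Nat) (hr : pvRel nums t i a b) :
    pvRel nums t i (l.foldl (pvStepA nums t i) a) (l.foldl (pvStepB nums t bestL i) b) := by
  induction l generalizing a b with
  | nil => exact hr
  | cons x xs ih =>
    have hx : x < i := hl x (List.mem_cons_self ..)
    exact ih (fun j hj => hl j (List.mem_cons_of_mem _ hj)) _ _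
      (pvStep_rel nums t bestL i x hx h2 (hb x hx) a b hr)

theorem pvStepB_last_pos (nums : List Int) (t : Int) (bestL : List Int) (i : Nat)
    (ht : 0 < t) (hi : 1 ≤ i) (_h2 : i ≤ nums.length) (b : Int × Nat) :
    1 ≤ (pvStepB nums t bestL i b (i - 1)).1 := by
  rw [pvStepB_eq]
  rw [pvGetD_pred nums i hi, PySem.List.pyGetD_natCast]
  have hsz : (1 : Int) ≤ (i : Int) - ((i - 1 : Nat) : Int) := by omega
  rw [if_pos (by omega)]
  split_ifs <;> omega

theorem pvInner_spec (nums : List Int) (t : Int) (bestL : List Int) (i : Nat)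
    (ht : 0 < t) (hi : 1 ≤ i) (h2 : i ≤ nums.length)
    (hb : ∀ j, j < i → bestL.getD j 0 = (pvSolveA nums t j).1) :
    (pvInnerB nums t bestL i).2 < i ∧
    pvSolveA nums t i = ((pvInnerB nums t bestL i).1,
      (pvSolveA nums t (pvInnerB nums t bestL i).2).2 ++
        [pvGr nums (pvInnerB nums t bestL i).2 i]) := by
  have hrange : List.range i = List.range (i - 1) ++ [i - 1] := by
    conv_lhs => rw [show i = (i - 1) + 1 by omega]
    exact List.range_succ
  have hA := pvSolveA_succ nums t i hi
  rw [hrange] at hA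
  have hB : pvInnerB nums t bestL i =
      (List.range (i - 1) ++ [i - 1]).foldl (pvStepB nums t bestL i) (-1, 0) := by
    rw [pvInnerB, hrange]
  rw [List.foldl_append] at hA hB
  have hrel0 : pvRel nums t i (-1, ([] : List (List Int))) (-1, 0) :=
    ⟨rfl, fun _ => rfl, fun habs => absurd rfl habs⟩
  have hrel : pvRel nums t i ((List.range (i - 1)).foldl (pvStepA nums t i) (-1, []))
      ((List.range (i - 1)).foldl (pvStepB nums t bestL i) (-1, 0)) :=
    pvFold_rel nums t bestL i h2 hb _ (fun j hj => by
      have := List.mem_range.mp hj; omega) _ _ hrel0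
  have hrelF := pvStep_rel nums t bestL i (i - 1) (by omega) h2 (hb _ (by omega)) _ _ hrel
  have hpos := pvStepB_last_pos nums t bestL i ht hi h2
    ((List.range (i - 1)).foldl (pvStepB nums t bestL i) (-1, 0))
  obtain ⟨he, _, hval⟩ := hrelF
  have hne : (pvStepA nums t i ((List.range (i - 1)).foldl (pvStepA nums t i) (-1, [])) (i - 1)).1 ≠ -1 := by
    omega
  obtain ⟨hlt, hv⟩ := hval hne
  simp only [List.foldl_cons, List.foldl_nil] at hA hB
  rw [hB]
  exact ⟨hlt, by rw [hA]; exact Prod.ext he hv⟩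

theorem pvTables_spec (nums : List Int) (t : Int) (ht : 0 < t) :
    ∀ k, k ≤ nums.length →
    (pvTablesB nums t k).1.length = k + 1 ∧ (pvTablesB nums t k).2.length = k + 1 ∧
    (∀ j, j ≤ k → (pvTablesB nums t k).1.getD j 0 = (pvSolveA nums t j).1) ∧
    (∀ i, 1 ≤ i → i ≤ k →
      (pvTablesB nums t k).2.getD i 0 < i ∧
      (pvSolveA nums t i).2 =
        (pvSolveA nums t ((pvTablesB nums t k).2.getD i 0)).2 ++
          [pvGr nums ((pvTablesB nums t k).2.getD i 0) i]) := by
  intro k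
  induction k with
  | zero =>
    intro _
    refine ⟨rfl, rfl, ?_, ?_⟩
    · intro j hj
      have : j = 0 := by omega
      subst this
      simp [pvTablesB, pvSolveA]
    · intro i hi1 hi2; omega
  | succ k ih =>
    intro hk
    obtain ⟨hl1, hl2, hbest, hpar⟩ := ih (by omega)
    have hstep : pvTablesB nums t (k + 1) =
        ((pvTablesB nums t k).1 ++ [(pvInnerB nums t (pvTablesB nums t k).1 (k + 1)).1],
         (pvTablesB nums t k).2 ++ [(pvInnerB nums t (pvTablesB nums t k).1 (k + 1)).2]) := by
      rw [pvTablesB, pvTablesB, List.range'_concat, List.foldl_append]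
      simp only [List.foldl_cons, List.foldl_nil, one_mul]
      rw [show 1 + k = k + 1 by omega]
    have hinner := pvInner_spec nums t (pvTablesB nums t k).1 (k + 1) ht (by omega) hk
      (fun j hj => hbest j (by omega))
    have hbest' : ∀ j, j ≤ k + 1 → (pvTablesB nums t (k + 1)).1.getD j 0 = (pvSolveA nums t j).1 := by
      intro j hj
      rw [hstep]
      rcases Nat.lt_or_ge j (k + 1) with hlt | hge
      · rw [pvGetD_append_left _ _ _ _ (by omega)]
        exact hbest j (by omega)
      · have hj1 : j = k + 1 := by omega
        rw [pvGetD_append_last _ _ _ _ (by omega), hj1, hinner.2]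
    refine ⟨by rw [hstep]; simp [hl1], by rw [hstep]; simp [hl2], hbest', ?_⟩
    intro i hi1 hi2
    rcases Nat.lt_or_ge i (k + 1) with hlt | hge
    · have hg : (pvTablesB nums t (k + 1)).2.getD i 0 = (pvTablesB nums t k).2.getD i 0 := by
        rw [hstep]
        exact pvGetD_append_left _ _ _ _ (by omega)
      rw [hg]
      exact hpar i hi1 (by omega)
    · have hi3 : i = k + 1 := by omega
      have hg : (pvTablesB nums t (k + 1)).2.getD i 0 =
          (pvInnerB nums t (pvTablesB nums t k).1 (k + 1)).2 := by
        rw [hstep]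
        exact pvGetD_append_last _ _ _ _ (by omega)
      rw [hg, hi3]
      refine ⟨hinner.1, ?_⟩
      rw [hinner.2]

theorem pvRecon_spec (nums : List Int) (t : Int) (P : List Nat) (n : Nat)
    (hP : ∀ i, 1 ≤ i → i ≤ n →
      P.getD i 0 < i ∧
      (pvSolveA nums t i).2 = (pvSolveA nums t (P.getD i 0)).2 ++ [pvGr nums (P.getD i 0) i]) :
    ∀ i, i ≤ n → ∀ fuel, i ≤ fuel → ∀ acc,
      pvReconB nums P fuel i acc = acc ++ ((pvSolveA nums t i).2).reverse := by
  intro i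
  induction i using Nat.strong_induction_on with
  | _ i ih =>
    intro hin fuel hfuel acc
    rcases Nat.eq_zero_or_pos i with hz | hpos
    · subst hz
      cases fuel with
      | zero => simp [pvReconB, pvSolveA]
      | succ f => simp [pvReconB, pvSolveA]
    · obtain ⟨f, rfl⟩ : ∃ f, fuel = f + 1 := ⟨fuel - 1, by omega⟩
      obtain ⟨hjlt, hdec⟩ := hP i hpos hin
      rw [pvReconB, if_pos hpos]
      simp only
      rw [pvSlice_eq]
      rw [ih (P.getD i 0) hjlt (by omega) f (by omega)]
      rw [hdec]
      simp

-- ===== VERDICT (by name: the statement is the Claim_ definition above) =====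
theorem partition_numbers_by_proximity_spec : Claim_equal_partition_numbers_by_proximity := by
  intro numbers threshold _ hpre
  unfold Spec_partition_numbers_by_proximity
  unfold partition_numbers_by_proximity partition_numbers_by_proximity_alt
  by_cases hnil : numbers = []
  · rw [if_pos hnil, if_pos hnil]
  · rw [if_neg hnil, if_neg hnil]
    have ht : 0 < threshold := by
      rcases hpre with h | h
      · exact absurd h hnil
      · exact h
    dsimp only
    obtain ⟨_, _, _, hpar⟩ := pvTables_spec
      (PySem.List.sorted (PySem.Set.ofList numbers) (fun x => x) false) threshold ht
      (PySem.List.sorted (PySem.Set.ofList numbers) (fun x => x) false).length le_rfl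
    rw [pvRecon_spec _ threshold _ _ hpar _ le_rfl _ (by omega) []]
    simp
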